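-- pv_equiv track=rewrite | github.com/tom-alexa/Advent-of-Code | 2021/05/solution.py | loop_vectors
-- ===== SOURCE A (Python) =====
-- def start_end(vector):
--     start_x = vector["A"][0]
--     end_x = vector["B"][0]
--     if vector["A"][0] > vector["B"][0]:
--         start_x, end_x = end_x, start_x
--     start_y = vector["A"][1]
--     end_y = vector["B"][1]
--     if vector["A"][1] > vector["B"][1]:
--         start_y, end_y = end_y, start_y
--     return start_x, end_x, start_y, end_y
--
-- def loop_vectors(vectors, diagonal=False):
--     mapper = {}
--     count = 0
--     for vector in vectors:
--         if not (vector["A"][0] == vector["B"][0] or vector["A"][1] == vector["B"][1]):                              # horizontal, vertical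
--             if (not diagonal) or (abs(vector["A"][0] - vector["B"][0]) != abs(vector["A"][1] - vector["B"][1])):    # diagonal
--                 continue
--         start_x, end_x, start_y, end_y = start_end(vector)
--         if not diagonal or (vector["A"][0] == vector["B"][0] or vector["A"][1] == vector["B"][1]):                  # horizontal, vertical
--             for x in range(start_x, end_x + 1):
--                 for y in range(start_y, end_y + 1):
--                     mapper[(x, y)] = mapper.setdefault((x, y), 0) + 1
--                     if mapper[(x, y)] == 2:
--                         count += 1
--         else:                                                                                                       # diagonal
--             for i in range(end_x - start_x + 1):
--                 if vector["A"][0] == start_x: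
--                     if vector["A"][1] == start_y:
--                         x, y = vector["A"][0] + i, vector["A"][1] + i
--                     else:
--                         x, y = vector["A"][0] + i, vector["A"][1] - i
--                 else:
--                     if vector["A"][1] == start_y:
--                         x, y = vector["A"][0] - i, vector["A"][1] + i
--                     else:
--                         x, y = vector["A"][0] - i, vector["A"][1] - i
--                 mapper[(x, y)] = mapper.setdefault((x, y), 0) + 1
--                 if mapper[(x, y)] == 2:
--                     count += 1
--     return count
-- ===== SOURCE B (Python) =====
-- def loop_vectors(vectors, diagonal=False):
--     counts = {}
--     for vector in vectors:
--         ax, ay = vector["A"][0], vector["A"][1]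
--         bx, by = vector["B"][0], vector["B"][1]
--         dx, dy = bx - ax, by - ay
--         if dx != 0 and dy != 0 and not (diagonal and abs(dx) == abs(dy)):
--             continue
--         sx = (dx > 0) - (dx < 0)
--         sy = (dy > 0) - (dy < 0)
--         for i in range(max(abs(dx), abs(dy)) + 1):
--             p = (ax + i * sx, ay + i * sy)
--             counts[p] = counts.get(p, 0) + 1
--     return sum(1 for v in counts.values() if v >= 2)
-- ===== Notes on version B (the rewrite author's own statement) =====
-- stated objective: simpler
-- what changed: Replaces the start_end swapping helper and the four-way diagonal branch with one uniform sign/step point generator per segment, accumulates all covered points into a single counting dict, and counts cells with count >= 2 in a separate final pass instead of detecting the threshold inside the update loop.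
import Mathlib
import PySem

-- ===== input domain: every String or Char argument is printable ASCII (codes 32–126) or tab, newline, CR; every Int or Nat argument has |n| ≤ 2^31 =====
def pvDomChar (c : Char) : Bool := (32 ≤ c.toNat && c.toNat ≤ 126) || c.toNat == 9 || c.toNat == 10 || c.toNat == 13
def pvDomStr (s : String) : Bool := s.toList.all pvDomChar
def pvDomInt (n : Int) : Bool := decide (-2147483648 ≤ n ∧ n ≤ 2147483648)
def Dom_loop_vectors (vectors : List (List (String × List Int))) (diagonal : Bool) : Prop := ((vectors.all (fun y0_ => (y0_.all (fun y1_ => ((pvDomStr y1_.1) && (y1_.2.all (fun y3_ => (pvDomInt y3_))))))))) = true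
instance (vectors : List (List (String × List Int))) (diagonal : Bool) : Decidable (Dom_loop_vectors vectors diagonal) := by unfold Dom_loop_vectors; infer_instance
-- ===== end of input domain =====

-- B replaces A's start_end/four-way-diagonal branches by one uniform sign/step point
-- generator and counts cells ≥ 2 in a separate final pass (objective: simpler).

-- ===== PORT A =====
-- vector["A"][i] (first-match dict lookup, then index); total via defaults, exact under Pre_
def pvGetKey (vector : List (String × List Int)) (k : String) (i : Int) : Int :=
  PySem.List.pyGetD ((List.lookup k vector).getD []) i 0

-- mapper[(x,y)] = mapper.setdefault((x,y),0) + 1 ; if mapper[(x,y)] == 2: count += 1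
def pvTally (m : PySem.Dict (Int × Int) Int) (c : Int) (x y : Int) : PySem.Dict (Int × Int) Int × Int :=
  let m1 := m.setdefault (x, y) 0
  let m2 := m1.insert (x, y) (m1.getD (x, y) 0 + 1)
  (m2, if m2.getD (x, y) 0 = 2 then c + 1 else c)

def start_end (vector : List (String × List Int)) : Int × Int × Int × Int :=
  let start_x := pvGetKey vector "A" 0
  let end_x := pvGetKey vector "B" 0
  let sx := if pvGetKey vector "A" 0 > pvGetKey vector "B" 0 then end_x else start_x
  let ex := if pvGetKey vector "A" 0 > pvGetKey vector "B" 0 then start_x else end_x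
  let start_y := pvGetKey vector "A" 1
  let end_y := pvGetKey vector "B" 1
  let sy := if pvGetKey vector "A" 1 > pvGetKey vector "B" 1 then end_y else start_y
  let ey := if pvGetKey vector "A" 1 > pvGetKey vector "B" 1 then start_y else end_y
  (sx, ex, sy, ey)

-- the body of A's 'for vector in vectors' loop, state = (mapper, count)
def pvBody (diagonal : Bool) (st : PySem.Dict (Int × Int) Int × Int) (vector : List (String × List Int)) : PySem.Dict (Int × Int) Int × Int :=
  if ¬ (pvGetKey vector "A" 0 = pvGetKey vector "B" 0 ∨ pvGetKey vector "A" 1 = pvGetKey vector "B" 1) ∧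
      (¬ diagonal = true ∨ |pvGetKey vector "A" 0 - pvGetKey vector "B" 0| ≠ |pvGetKey vector "A" 1 - pvGetKey vector "B" 1|) then
    st
  else
    let se := start_end vector
    if ¬ diagonal = true ∨ (pvGetKey vector "A" 0 = pvGetKey vector "B" 0 ∨ pvGetKey vector "A" 1 = pvGetKey vector "B" 1) then
      (PySem.List.pyRange se.1 (se.2.1 + 1) 1).foldl (fun st2 x =>
        (PySem.List.pyRange se.2.2.1 (se.2.2.2 + 1) 1).foldl (fun st3 y => pvTally st3.1 st3.2 x y) st2) st
    else
      (PySem.List.pyRange 0 (se.2.1 - se.1 + 1) 1).foldl (fun st2 i =>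
        let p : Int × Int :=
          if pvGetKey vector "A" 0 = se.1 then
            (if pvGetKey vector "A" 1 = se.2.2.1 then (pvGetKey vector "A" 0 + i, pvGetKey vector "A" 1 + i)
             else (pvGetKey vector "A" 0 + i, pvGetKey vector "A" 1 - i))
          else
            (if pvGetKey vector "A" 1 = se.2.2.1 then (pvGetKey vector "A" 0 - i, pvGetKey vector "A" 1 + i)
             else (pvGetKey vector "A" 0 - i, pvGetKey vector "A" 1 - i))
        pvTally st2.1 st2.2 p.1 p.2) st

def loop_vectors (vectors : List (List (String × List Int))) (diagonal : Bool) : Int :=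
  (vectors.foldl (pvBody diagonal) (PySem.Dict.empty, 0)).2

-- ===== PORT B =====
-- the body of B's 'for vector in vectors' loop, state = counts
def pvBodyB (diagonal : Bool) (counts : PySem.Dict (Int × Int) Int) (vector : List (String × List Int)) : PySem.Dict (Int × Int) Int :=
  let ax := pvGetKey vector "A" 0
  let ay := pvGetKey vector "A" 1
  let bx := pvGetKey vector "B" 0
  let by' := pvGetKey vector "B" 1
  let dx := bx - ax
  let dy := by' - ay
  if dx ≠ 0 ∧ dy ≠ 0 ∧ ¬ (diagonal = true ∧ |dx| = |dy|) then
    counts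
  else
    let sx := (if dx > 0 then (1 : Int) else 0) - (if dx < 0 then 1 else 0)
    let sy := (if dy > 0 then (1 : Int) else 0) - (if dy < 0 then 1 else 0)
    (PySem.List.pyRange 0 (max |dx| |dy| + 1) 1).foldl (fun d i =>
      let p := (ax + i * sx, ay + i * sy)
      d.insert p (d.getD p 0 + 1)) counts

def loop_vectors_alt (vectors : List (List (String × List Int))) (diagonal : Bool) : Int :=
  let counts := vectors.foldl (pvBodyB diagonal) PySem.Dict.empty
  ((counts.values).map (fun v => if 2 ≤ v then (1 : Int) else 0)).sum

-- ===== PRECONDITION & SPEC =====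
-- Pre_ excludes exactly the inputs where Python A raises: a vector missing key "A" or "B"
-- (KeyError) or whose coordinate list has fewer than two entries (IndexError).
def Pre_loop_vectors (vectors : List (List (String × List Int))) (diagonal : Bool) : Prop :=
  ∀ v ∈ vectors, 2 ≤ ((List.lookup "A" v).getD []).length ∧ 2 ≤ ((List.lookup "B" v).getD []).length
instance (vectors : List (List (String × List Int))) (diagonal : Bool) : Decidable (Pre_loop_vectors vectors diagonal) := by unfold Pre_loop_vectors; infer_instance

def pvWitness_loop_vectors : (List (List (String × List Int))) × Bool :=
  ([[("A", [0, 0]), ("B", [2, 0])], [("A", [1, 1]), ("B", [1, -1])], [("A", [0, 2]), ("B", [2, 0])]], true)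

def Spec_loop_vectors (vectors : List (List (String × List Int))) (diagonal : Bool) (out : Int) : Prop := out = loop_vectors_alt vectors diagonal
instance (vectors : List (List (String × List Int))) (diagonal : Bool) (out : Int) : Decidable (Spec_loop_vectors vectors diagonal out) := by unfold Spec_loop_vectors; infer_instance

-- ===== CLAIM (what is proved, stated in full; the proofs are below) =====
def Claim_equal_loop_vectors : Prop := ∀ (vectors : List (List (String × List Int))) (diagonal : Bool), Dom_loop_vectors vectors diagonal → Pre_loop_vectors vectors diagonal → Spec_loop_vectors vectors diagonal (loop_vectors vectors diagonal)

-- ===== LEMMAS AND PROOFS =====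

-- the per-point step of A, as a function of the state pair and the point
def tstep (st : PySem.Dict (Int × Int) Int × Int) (p : Int × Int) : PySem.Dict (Int × Int) Int × Int :=
  pvTally st.1 st.2 p.1 p.2

-- number of cells covered at least twice by the multiset of points l
def nu (l : List (Int × Int)) : Nat :=
  List.countP (fun p => 2 ≤ l.count p) (PySem.Set.ofList l)

-- the list of points A's branches generate for one vector (A0,A1)–(B0,B1)
def ptsA (diagonal : Bool) (A0 A1 B0 B1 : Int) : List (Int × Int) :=
  if ¬ (A0 = B0 ∨ A1 = B1) ∧ (¬ diagonal = true ∨ |A0 - B0| ≠ |A1 - B1|) then []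
  else if ¬ diagonal = true ∨ (A0 = B0 ∨ A1 = B1) then
    (PySem.List.pyRange (min A0 B0) (max A0 B0 + 1) 1).flatMap (fun x =>
      (PySem.List.pyRange (min A1 B1) (max A1 B1 + 1) 1).map (fun y => (x, y)))
  else
    (PySem.List.pyRange 0 (max A0 B0 - min A0 B0 + 1) 1).map (fun i =>
      if A0 = min A0 B0 then
        (if A1 = min A1 B1 then (A0 + i, A1 + i) else (A0 + i, A1 - i))
      else
        (if A1 = min A1 B1 then (A0 - i, A1 + i) else (A0 - i, A1 - i)))

-- the list of points B generates for one vector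
def ptsB (diagonal : Bool) (A0 A1 B0 B1 : Int) : List (Int × Int) :=
  if (B0 - A0) ≠ 0 ∧ (B1 - A1) ≠ 0 ∧ ¬ (diagonal = true ∧ |B0 - A0| = |B1 - A1|) then []
  else
    (PySem.List.pyRange 0 (max |B0 - A0| |B1 - A1| + 1) 1).map (fun i =>
      (A0 + i * ((if B0 - A0 > 0 then (1 : Int) else 0) - (if B0 - A0 < 0 then 1 else 0)),
       A1 + i * ((if B1 - A1 > 0 then (1 : Int) else 0) - (if B1 - A1 < 0 then 1 else 0))))

lemma start_end_eq (v : List (String × List Int)) :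
    start_end v = (min (pvGetKey v "A" 0) (pvGetKey v "B" 0), max (pvGetKey v "A" 0) (pvGetKey v "B" 0),
                   min (pvGetKey v "A" 1) (pvGetKey v "B" 1), max (pvGetKey v "A" 1) (pvGetKey v "B" 1)) := by
  simp only [start_end]
  split_ifs with h1 h2 <;> simp [Prod.ext_iff] <;> omega

lemma tally_insert (m : PySem.Dict (Int × Int) Int) (c x y : Int) :
    pvTally m c x y = (m.insert (x, y) (m.getD (x, y) 0 + 1),
      if m.getD (x, y) 0 + 1 = 2 then c + 1 else c) := by
  simp only [pvTally]
  by_cases h : m.contains (x, y)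
  · rw [PySem.Dict.setdefault_of_contains m 0 h]
    simp [PySem.Dict.getD_insert_self]
  · have h' : m.contains (x, y) = false := by simpa using h
    rw [PySem.Dict.setdefault_of_not_contains m 0 h']
    simp [PySem.Dict.getD_insert_self, PySem.Dict.insert_insert_self,
      PySem.Dict.getD_of_not_contains m 0 h']

lemma bodyA_eq (diagonal : Bool) (st : PySem.Dict (Int × Int) Int × Int) (v : List (String × List Int)) :
    pvBody diagonal st v =
      (ptsA diagonal (pvGetKey v "A" 0) (pvGetKey v "A" 1) (pvGetKey v "B" 0) (pvGetKey v "B" 1)).foldl tstep st := by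
  simp only [pvBody, ptsA, start_end_eq]
  split_ifs <;> first | rfl | (simp only [List.foldl_flatMap, List.foldl_map]; rfl)

lemma bodyB_eq (diagonal : Bool) (counts : PySem.Dict (Int × Int) Int) (v : List (String × List Int)) :
    pvBodyB diagonal counts v =
      (ptsB diagonal (pvGetKey v "A" 0) (pvGetKey v "A" 1) (pvGetKey v "B" 0) (pvGetKey v "B" 1)).foldl
        (fun d p => d.insert p (d.getD p 0 + 1)) counts := by
  simp only [pvBodyB, ptsB]
  split_ifs <;> first | rfl | (simp only [List.foldl_map]; try rfl)

lemma countP_swap (S : List (Int × Int)) (hnd : S.Nodup) (p : Int × Int) (hp : p ∈ S)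
    (f g : (Int × Int) → Bool) (h : ∀ q ∈ S, q ≠ p → f q = g q) :
    S.countP f + (if g p then 1 else 0) = S.countP g + (if f p then 1 else 0) := by
  induction S with
  | nil => cases hp
  | cons a S ih =>
    rw [List.nodup_cons] at hnd
    rcases List.mem_cons.mp hp with rfl | hp'
    · have hfg : List.countP f S = List.countP g S :=
        List.countP_congr (fun q hq => by
          rw [h q (List.mem_cons_of_mem _ hq) (fun e => hnd.1 (e ▸ hq))])
      simp only [List.countP_cons, hfg]
      split_ifs <;> omega
    · have ha : f a = g a := h a List.mem_cons_self (fun e => hnd.1 (e ▸ hp'))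
      have := ih hnd.2 hp' (fun q hq hne => h q (List.mem_cons_of_mem _ hq) hne)
      simp only [List.countP_cons, ha]
      omega

lemma nu_append (l : List (Int × Int)) (p : Int × Int) :
    nu (l ++ [p]) = nu l + (if l.count p + 1 = 2 then 1 else 0) := by
  unfold nu
  rw [PySem.Set.ofList_append_singleton]
  by_cases hp : p ∈ l
  · rw [PySem.Set.add_of_mem ((PySem.Set.mem_ofList l p).mpr hp)]
    have hsw := countP_swap (PySem.Set.ofList l) (PySem.Set.nodup_ofList l) p ((PySem.Set.mem_ofList l p).mpr hp)
        (fun q => decide (2 ≤ (l ++ [p]).count q)) (fun q => decide (2 ≤ l.count q))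
        (fun q hq hne => by simp [List.count_append, Ne.symm hne])
    have hcp : (l ++ [p]).count p = l.count p + 1 := by simp [List.count_append]
    have h1 : 0 < l.count p := List.count_pos_iff.mpr hp
    simp only [hcp, decide_eq_true_eq] at hsw ⊢
    split_ifs at hsw ⊢ <;> omega
  · rw [PySem.Set.add_of_not_mem (fun hm => hp ((PySem.Set.mem_ofList l p).mp hm))]
    have h0 : l.count p = 0 := List.count_eq_zero.mpr hp
    have hS : List.countP (fun q => decide (2 ≤ (l ++ [p]).count q)) (PySem.Set.ofList l) =
        List.countP (fun q => decide (2 ≤ l.count q)) (PySem.Set.ofList l) :=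
      List.countP_congr (fun q hq => by
        have hql : q ∈ l := (PySem.Set.mem_ofList l q).mp hq
        have hne : q ≠ p := fun e => hp (e ▸ hql)
        simp [List.count_append, Ne.symm hne])
    rw [List.countP_append, hS]
    have hpc : (l ++ [p]).count p = 1 := by simp [List.count_append, h0]
    simp [h0]

lemma counter_snoc (qs : List (Int × Int)) (p : Int × Int) :
    PySem.Dict.counter (qs ++ [p]) = (PySem.Dict.counter qs).insert p ((PySem.Dict.counter qs).getD p 0 + 1) := by
  rw [PySem.Dict.counter_append_singleton]; rfl

lemma fold_counter (ps qs : List (Int × Int)) :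
    ps.foldl tstep (PySem.Dict.counter qs, (nu qs : Int)) =
      (PySem.Dict.counter (qs ++ ps), (nu (qs ++ ps) : Int)) := by
  induction ps generalizing qs with
  | nil => simp
  | cons p ps ih =>
    rw [List.foldl_cons]
    have hstep : tstep (PySem.Dict.counter qs, (nu qs : Int)) p =
        (PySem.Dict.counter (qs ++ [p]), (nu (qs ++ [p]) : Int)) := by
      show pvTally _ _ p.1 p.2 = _
      rw [tally_insert]
      refine Prod.ext ?_ ?_
      · simp [counter_snoc]
      · simp only [PySem.Dict.getD_counter, nu_append]
        have hiff : (((qs.count p : Nat) : Int) + 1 = 2) ↔ (qs.count p + 1 = 2) := by omega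
        by_cases hc : qs.count p + 1 = 2
        · rw [if_pos (hiff.mpr hc), if_pos hc]
          push_cast
          ring
        · rw [if_neg (fun h => hc (hiff.mp h)), if_neg hc]
          simp
    rw [hstep, ih]
    simp

lemma nu_perm {l1 l2 : List (Int × Int)} (h : l1.Perm l2) : nu l1 = nu l2 := by
  have hS : (PySem.Set.ofList l1).Perm (PySem.Set.ofList l2) :=
    (List.perm_ext_iff_of_nodup (PySem.Set.nodup_ofList l1) (PySem.Set.nodup_ofList l2)).mpr
      (fun a => by simp [PySem.Set.mem_ofList, h.mem_iff])
  unfold nu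
  calc List.countP (fun p => decide (2 ≤ l1.count p)) (PySem.Set.ofList l1)
      = List.countP (fun p => decide (2 ≤ l2.count p)) (PySem.Set.ofList l1) :=
        List.countP_congr (fun x _ => by simp [h.count_eq])
    _ = List.countP (fun p => decide (2 ≤ l2.count p)) (PySem.Set.ofList l2) := hS.countP_eq _

lemma nodup_grid (a b c d : Int) :
    ((PySem.List.pyRange a b 1).flatMap (fun x => (PySem.List.pyRange c d 1).map (fun y => (x, y)))).Nodup :=
  (PySem.List.nodup_pyRange_one a b).product (PySem.List.nodup_pyRange_one c d)

lemma nodup_ray (a c sx sy n : Int) (h : sx ≠ 0 ∨ sy ≠ 0) :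
    ((PySem.List.pyRange 0 n 1).map (fun i => (a + i * sx, c + i * sy))).Nodup := by
  refine List.Nodup.map ?_ (PySem.List.nodup_pyRange_one 0 n)
  intro i j hij
  rw [Prod.mk.injEq] at hij
  rcases h with h | h
  · have h2 : i * sx = j * sx := by linarith [hij.1]
    exact mul_right_cancel₀ h h2
  · have h2 : i * sy = j * sy := by linarith [hij.2]
    exact mul_right_cancel₀ h h2

lemma pts_perm (diagonal : Bool) (A0 A1 B0 B1 : Int) :
    (ptsA diagonal A0 A1 B0 B1).Perm (ptsB diagonal A0 A1 B0 B1) := by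
  unfold ptsA ptsB
  by_cases hskip : ¬(A0 = B0 ∨ A1 = B1) ∧ (¬diagonal = true ∨ |A0 - B0| ≠ |A1 - B1|)
  · have hB : (B0 - A0) ≠ 0 ∧ (B1 - A1) ≠ 0 ∧ ¬(diagonal = true ∧ |B0 - A0| = |B1 - A1|) := by
      obtain ⟨h1, h2⟩ := hskip
      refine ⟨fun h => h1 (Or.inl (by omega)), fun h => h1 (Or.inr (by omega)), ?_⟩
      rintro ⟨hd, habs⟩
      rcases h2 with h2 | h2
      · exact h2 hd
      · exact h2 (by rw [abs_sub_comm A0 B0, abs_sub_comm A1 B1]; exact habs)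
    rw [if_pos hskip, if_pos hB]
  · have hB : ¬((B0 - A0) ≠ 0 ∧ (B1 - A1) ≠ 0 ∧ ¬(diagonal = true ∧ |B0 - A0| = |B1 - A1|)) := by
      intro hc
      apply hskip
      refine ⟨fun hal => ?_, ?_⟩
      · rcases hal with h | h
        · exact hc.1 (by omega)
        · exact hc.2.1 (by omega)
      · by_cases hd : diagonal = true
        · right
          intro habs
          exact hc.2.2 ⟨hd, by rw [abs_sub_comm B0 A0, abs_sub_comm B1 A1]; exact habs⟩
        · exact Or.inl hd
    rw [if_neg hskip, if_neg hB]
    by_cases hal : A0 = B0 ∨ A1 = B1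
    · rw [if_pos (Or.inr hal)]
      rcases hal with h | h
      · -- vertical: A0 = B0
        subst h
        rcases lt_trichotomy A1 B1 with h1 | h1 | h1
        · rw [show |A0 - A0| = (0:Int) by simp, show |B1 - A1| = B1 - A1 from abs_of_pos (by omega)]
          simp only [if_neg (show ¬(A0 - A0 > 0) by omega), if_neg (show ¬(A0 - A0 < 0) by omega),
            if_pos (show B1 - A1 > 0 by omega), if_neg (show ¬(B1 - A1 < 0) by omega)]
          refine (List.perm_ext_iff_of_nodup (nodup_grid _ _ _ _) (nodup_ray _ _ _ _ _ (by omega))).mpr ?_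
          rintro ⟨x, y⟩
          simp only [List.mem_flatMap, List.mem_map, PySem.List.mem_pyRange_one, Prod.mk.injEq]
          constructor
          · rintro ⟨a, ha, b, hb, rfl, rfl⟩
            exact ⟨b - A1, by omega, by omega, by omega⟩
          · rintro ⟨i, hi, rfl, rfl⟩
            exact ⟨A0, by omega, A1 + i * (1 - 0), by omega, by omega, by omega⟩
        · subst h1
          simp only [show |A0 - A0| = (0:Int) by simp, show |A1 - A1| = (0:Int) by simp,
            if_neg (show ¬(A0 - A0 > 0) by omega), if_neg (show ¬(A0 - A0 < 0) by omega),
            if_neg (show ¬(A1 - A1 > 0) by omega), if_neg (show ¬(A1 - A1 < 0) by omega)]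
          refine (List.perm_ext_iff_of_nodup (nodup_grid _ _ _ _) ?_).mpr ?_
          · rw [show max (0:Int) 0 + 1 = 0 + 1 by omega, PySem.List.pyRange_one_singleton]
            simp
          · rintro ⟨x, y⟩
            simp only [List.mem_flatMap, List.mem_map, PySem.List.mem_pyRange_one, Prod.mk.injEq]
            constructor
            · rintro ⟨a, ha, b, hb, rfl, rfl⟩
              exact ⟨0, by omega, by omega, by omega⟩
            · rintro ⟨i, hi, rfl, rfl⟩
              exact ⟨A0, by omega, A1 + i * (0 - 0), by omega, by omega, by omega⟩
        · rw [show |A0 - A0| = (0:Int) by simp, show |B1 - A1| = A1 - B1 by rw [abs_of_neg (show B1 - A1 < 0 by omega)]; ring]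
          simp only [if_neg (show ¬(A0 - A0 > 0) by omega), if_neg (show ¬(A0 - A0 < 0) by omega),
            if_neg (show ¬(B1 - A1 > 0) by omega), if_pos (show B1 - A1 < 0 by omega)]
          refine (List.perm_ext_iff_of_nodup (nodup_grid _ _ _ _) (nodup_ray _ _ _ _ _ (by omega))).mpr ?_
          rintro ⟨x, y⟩
          simp only [List.mem_flatMap, List.mem_map, PySem.List.mem_pyRange_one, Prod.mk.injEq]
          constructor
          · rintro ⟨a, ha, b, hb, rfl, rfl⟩
            exact ⟨A1 - b, by omega, by omega, by omega⟩
          · rintro ⟨i, hi, rfl, rfl⟩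
            exact ⟨A0, by omega, A1 + i * (0 - 1), by omega, by omega, by omega⟩
      · -- horizontal: A1 = B1
        subst h
        rcases lt_trichotomy A0 B0 with h1 | h1 | h1
        · rw [show |A1 - A1| = (0:Int) by simp, show |B0 - A0| = B0 - A0 from abs_of_pos (by omega)]
          simp only [if_neg (show ¬(A1 - A1 > 0) by omega), if_neg (show ¬(A1 - A1 < 0) by omega),
            if_pos (show B0 - A0 > 0 by omega), if_neg (show ¬(B0 - A0 < 0) by omega)]
          refine (List.perm_ext_iff_of_nodup (nodup_grid _ _ _ _) (nodup_ray _ _ _ _ _ (by omega))).mpr ?_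
          rintro ⟨x, y⟩
          simp only [List.mem_flatMap, List.mem_map, PySem.List.mem_pyRange_one, Prod.mk.injEq]
          constructor
          · rintro ⟨a, ha, b, hb, rfl, rfl⟩
            exact ⟨a - A0, by omega, by omega, by omega⟩
          · rintro ⟨i, hi, rfl, rfl⟩
            exact ⟨A0 + i * (1 - 0), by omega, A1, by omega, by omega, by omega⟩
        · subst h1
          simp only [show |A0 - A0| = (0:Int) by simp, show |A1 - A1| = (0:Int) by simp,
            if_neg (show ¬(A0 - A0 > 0) by omega), if_neg (show ¬(A0 - A0 < 0) by omega),
            if_neg (show ¬(A1 - A1 > 0) by omega), if_neg (show ¬(A1 - A1 < 0) by omega)]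
          refine (List.perm_ext_iff_of_nodup (nodup_grid _ _ _ _) ?_).mpr ?_
          · rw [show max (0:Int) 0 + 1 = 0 + 1 by omega, PySem.List.pyRange_one_singleton]
            simp
          · rintro ⟨x, y⟩
            simp only [List.mem_flatMap, List.mem_map, PySem.List.mem_pyRange_one, Prod.mk.injEq]
            constructor
            · rintro ⟨a, ha, b, hb, rfl, rfl⟩
              exact ⟨0, by omega, by omega, by omega⟩
            · rintro ⟨i, hi, rfl, rfl⟩
              exact ⟨A0, by omega, A1 + i * (0 - 0), by omega, by omega, by omega⟩
        · rw [show |A1 - A1| = (0:Int) by simp, show |B0 - A0| = A0 - B0 by rw [abs_of_neg (show B0 - A0 < 0 by omega)]; ring]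
          simp only [if_neg (show ¬(A1 - A1 > 0) by omega), if_neg (show ¬(A1 - A1 < 0) by omega),
            if_neg (show ¬(B0 - A0 > 0) by omega), if_pos (show B0 - A0 < 0 by omega)]
          refine (List.perm_ext_iff_of_nodup (nodup_grid _ _ _ _) (nodup_ray _ _ _ _ _ (by omega))).mpr ?_
          rintro ⟨x, y⟩
          simp only [List.mem_flatMap, List.mem_map, PySem.List.mem_pyRange_one, Prod.mk.injEq]
          constructor
          · rintro ⟨a, ha, b, hb, rfl, rfl⟩
            exact ⟨A0 - a, by omega, by omega, by omega⟩
          · rintro ⟨i, hi, rfl, rfl⟩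
            exact ⟨A0 + i * (0 - 1), by omega, A1, by omega, by omega, by omega⟩
    · -- diagonal segment
      have h0 : A0 ≠ B0 := fun e => hal (Or.inl e)
      have h1 : A1 ≠ B1 := fun e => hal (Or.inr e)
      have hd : diagonal = true ∧ |A0 - B0| = |A1 - B1| := by
        by_contra hcon
        exact hskip ⟨fun hc => hal hc, by tauto⟩
      rw [if_neg (show ¬(¬diagonal = true ∨ (A0 = B0 ∨ A1 = B1)) by
        rintro (hc | hc); exact hc hd.1; exact hal hc)]
      have habs := hd.2
      refine List.Perm.of_eq ?_
      rcases lt_or_gt_of_ne h0 with h0' | h0' <;> rcases lt_or_gt_of_ne h1 with h1' | h1'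
      · rw [show |A0 - B0| = B0 - A0 by rw [abs_of_neg (show A0 - B0 < 0 by omega)]; ring,
            show |A1 - B1| = B1 - A1 by rw [abs_of_neg (show A1 - B1 < 0 by omega)]; ring] at habs
        rw [show |B0 - A0| = B0 - A0 from abs_of_pos (by omega),
            show |B1 - A1| = B1 - A1 from abs_of_pos (by omega)]
        simp only [if_pos (show A0 = min A0 B0 by omega), if_pos (show A1 = min A1 B1 by omega),
          if_pos (show B0 - A0 > 0 by omega), if_neg (show ¬(B0 - A0 < 0) by omega),
          if_pos (show B1 - A1 > 0 by omega), if_neg (show ¬(B1 - A1 < 0) by omega)]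
        rw [show max A0 B0 - min A0 B0 + 1 = max (B0 - A0) (B1 - A1) + 1 by omega]
        refine List.map_congr_left fun i hi => ?_
        rw [Prod.mk.injEq]
        constructor <;> omega
      · rw [show |A0 - B0| = B0 - A0 by rw [abs_of_neg (show A0 - B0 < 0 by omega)]; ring,
            show |A1 - B1| = A1 - B1 from abs_of_pos (by omega)] at habs
        rw [show |B0 - A0| = B0 - A0 from abs_of_pos (by omega),
            show |B1 - A1| = A1 - B1 by rw [abs_of_neg (show B1 - A1 < 0 by omega)]; ring]
        simp only [if_pos (show A0 = min A0 B0 by omega), if_neg (show ¬(A1 = min A1 B1) by omega),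
          if_pos (show B0 - A0 > 0 by omega), if_neg (show ¬(B0 - A0 < 0) by omega),
          if_neg (show ¬(B1 - A1 > 0) by omega), if_pos (show B1 - A1 < 0 by omega)]
        rw [show max A0 B0 - min A0 B0 + 1 = max (B0 - A0) (A1 - B1) + 1 by omega]
        refine List.map_congr_left fun i hi => ?_
        rw [Prod.mk.injEq]
        constructor <;> omega
      · rw [show |A0 - B0| = A0 - B0 from abs_of_pos (by omega),
            show |A1 - B1| = B1 - A1 by rw [abs_of_neg (show A1 - B1 < 0 by omega)]; ring] at habs
        rw [show |B0 - A0| = A0 - B0 by rw [abs_of_neg (show B0 - A0 < 0 by omega)]; ring,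
            show |B1 - A1| = B1 - A1 from abs_of_pos (by omega)]
        simp only [if_neg (show ¬(A0 = min A0 B0) by omega), if_pos (show A1 = min A1 B1 by omega),
          if_neg (show ¬(B0 - A0 > 0) by omega), if_pos (show B0 - A0 < 0 by omega),
          if_pos (show B1 - A1 > 0 by omega), if_neg (show ¬(B1 - A1 < 0) by omega)]
        rw [show max A0 B0 - min A0 B0 + 1 = max (A0 - B0) (B1 - A1) + 1 by omega]
        refine List.map_congr_left fun i hi => ?_
        rw [Prod.mk.injEq]
        constructor <;> omega
      · rw [show |A0 - B0| = A0 - B0 from abs_of_pos (by omega),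
            show |A1 - B1| = A1 - B1 from abs_of_pos (by omega)] at habs
        rw [show |B0 - A0| = A0 - B0 by rw [abs_of_neg (show B0 - A0 < 0 by omega)]; ring,
            show |B1 - A1| = A1 - B1 by rw [abs_of_neg (show B1 - A1 < 0 by omega)]; ring]
        simp only [if_neg (show ¬(A0 = min A0 B0) by omega), if_neg (show ¬(A1 = min A1 B1) by omega),
          if_neg (show ¬(B0 - A0 > 0) by omega), if_pos (show B0 - A0 < 0 by omega),
          if_neg (show ¬(B1 - A1 > 0) by omega), if_pos (show B1 - A1 < 0 by omega)]
        rw [show max A0 B0 - min A0 B0 + 1 = max (A0 - B0) (A1 - B1) + 1 by omega]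
        refine List.map_congr_left fun i hi => ?_
        rw [Prod.mk.injEq]
        constructor <;> omega

lemma A_eq (vectors : List (List (String × List Int))) (diagonal : Bool) :
    loop_vectors vectors diagonal =
      (nu (vectors.flatMap (fun v => ptsA diagonal (pvGetKey v "A" 0) (pvGetKey v "A" 1) (pvGetKey v "B" 0) (pvGetKey v "B" 1))) : Int) := by
  unfold loop_vectors
  have h1 : vectors.foldl (pvBody diagonal) (PySem.Dict.empty, 0) =
      (vectors.flatMap (fun v => ptsA diagonal (pvGetKey v "A" 0) (pvGetKey v "A" 1) (pvGetKey v "B" 0) (pvGetKey v "B" 1))).foldl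
        tstep (PySem.Dict.empty, 0) := by
    rw [List.foldl_flatMap]
    exact PySem.List.foldl_congr_mem _ _ _ _ (fun st v _ => bodyA_eq diagonal st v)
  rw [h1]
  have h0 : ((PySem.Dict.empty, (0 : Int)) : PySem.Dict (Int × Int) Int × Int) =
      (PySem.Dict.counter ([] : List (Int × Int)), (nu [] : Int)) := rfl
  rw [h0, fold_counter]
  rfl

lemma B_eq (vectors : List (List (String × List Int))) (diagonal : Bool) :
    loop_vectors_alt vectors diagonal =
      (nu (vectors.flatMap (fun v => ptsB diagonal (pvGetKey v "A" 0) (pvGetKey v "A" 1) (pvGetKey v "B" 0) (pvGetKey v "B" 1))) : Int) := by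
  simp only [loop_vectors_alt]
  have h1 : vectors.foldl (pvBodyB diagonal) PySem.Dict.empty =
      PySem.Dict.counter (vectors.flatMap (fun v => ptsB diagonal (pvGetKey v "A" 0) (pvGetKey v "A" 1) (pvGetKey v "B" 0) (pvGetKey v "B" 1))) := by
    rw [← PySem.Dict.foldl_insert_getD_add_one_eq_counter, List.foldl_flatMap]
    exact PySem.List.foldl_congr_mem _ _ _ _ (fun st v _ => bodyB_eq diagonal st v)
  rw [h1]
  set fl := vectors.flatMap (fun v => ptsB diagonal (pvGetKey v "A" 0) (pvGetKey v "A" 1) (pvGetKey v "B" 0) (pvGetKey v "B" 1)) with hfl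
  have hv : (PySem.Dict.counter fl).values = (PySem.Set.ofList fl).map (fun k => ((fl.count k : Nat) : Int)) := by
    show ((PySem.Dict.counter fl).items).map Prod.snd = _
    rw [PySem.Dict.items_counter, List.map_map]
    rfl
  rw [hv, List.map_map]
  have := PySem.List.sum_map_ite_one_zero (fun k => decide ((2 : Int) ≤ ((fl.count k : Nat) : Int))) (PySem.Set.ofList fl)
  simp only [decide_eq_true_eq] at this
  rw [show ((fun v => if 2 ≤ v then (1 : Int) else 0) ∘ fun k => ((fl.count k : Nat) : Int)) =
      (fun k => if (2 : Int) ≤ ((fl.count k : Nat) : Int) then (1 : Int) else 0) from rfl, this]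
  unfold nu
  congr 1
  exact List.countP_congr (fun x _ => by simp only [decide_eq_true_eq]; omega)

-- ===== VERDICT (by name: the statement is the Claim_ definition above) =====
theorem loop_vectors_spec : Claim_equal_loop_vectors := by
  intro vectors diagonal _ _
  unfold Spec_loop_vectors
  rw [A_eq, B_eq]
  exact congrArg _ (nu_perm (List.Perm.flatMap (List.Perm.refl vectors) (fun v _ => pts_perm diagonal _ _ _ _)))
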